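-- pv_equiv track=rewrite | github.com/TaoishTechy/RGPUF | examples/core_tier/lab_v4/rgpuf_core.py | bundle
-- ===== SOURCE A (Python) =====
-- def bundle(vecs: list[list[int]]) -> list[int]:
--     if not vecs:
--         return []
--     n = len(vecs[0])
--     s = [0] * n
--     for v in vecs:
--         for i in range(n):
--             s[i] += v[i]
--     return [1 if x >= 0 else -1 for x in s]
-- ===== SOURCE B (Python) =====
-- def bundle(vecs: list[list[int]]) -> list[int]:
--     if not vecs:
--         return []
--     n = len(vecs[0])
--
--     def total(vs):
--         # elementwise sum (truncated to n columns) by divide and conquer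
--         if len(vs) == 1:
--             return [vs[0][i] for i in range(n)]
--         mid = len(vs) // 2
--         a = total(vs[:mid])
--         b = total(vs[mid:])
--         return [a[i] + b[i] for i in range(n)]
--
--     return [1 if x >= 0 else -1 for x in total(vecs)]
-- ===== Notes on version B (the rewrite author's own statement) =====
-- stated objective: alternative
-- what changed: Replaced A's linear row-major mutable accumulator array with a divide-and-conquer recursion that halves the vector list, elementwise-adds the two halves' totals, and finally maps each total to its sign.
import Mathlib
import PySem

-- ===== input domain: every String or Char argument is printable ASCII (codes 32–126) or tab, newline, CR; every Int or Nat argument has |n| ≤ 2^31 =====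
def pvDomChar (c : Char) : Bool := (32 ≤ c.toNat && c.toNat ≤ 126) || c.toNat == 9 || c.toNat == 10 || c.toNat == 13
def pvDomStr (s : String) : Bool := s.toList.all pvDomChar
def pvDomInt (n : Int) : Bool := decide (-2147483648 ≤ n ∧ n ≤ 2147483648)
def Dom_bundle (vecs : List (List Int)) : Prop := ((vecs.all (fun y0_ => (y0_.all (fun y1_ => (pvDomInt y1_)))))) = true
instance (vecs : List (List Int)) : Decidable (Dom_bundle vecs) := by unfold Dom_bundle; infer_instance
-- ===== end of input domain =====

-- B replaces A's linear mutable row-major accumulator with a divide-and-conquer pass: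
-- recursively halve the vector list, elementwise-add the halves' totals, then map sign
-- (objective: alternative decomposition, same asymptotic cost).


-- ===== PORT A =====
-- for v in vecs: for i in range(n): s[i] += v[i]
-- v[i] is in range on every input admitted by Pre_bundle; pyGetD returns that element there.
def bundle (vecs : List (List Int)) : List Int :=
  match vecs with
  | [] => []
  | v0 :: _ =>
    let n := v0.length
    let s : List Int :=
      vecs.foldl (fun s v =>
        (List.range n).foldl (fun s i => s.set i (s.getD i 0 + PySem.List.pyGetD v (i : Int) 0)) s)
        (List.replicate n 0)
    s.map (fun x => if x ≥ 0 then 1 else -1)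

-- ===== PORT B =====
-- total(vs): single vector -> its first n entries; otherwise split at len//2,
-- recurse on both halves, add elementwise (B's inner helper `total`).
-- The [] case is a totality guard only: B never calls total on an empty list.
def pvTotal (n : Nat) (vs : List (List Int)) : List Int :=
  match vs with
  | [] => []
  | [v] => (List.range n).map (fun (i : Nat) => PySem.List.pyGetD v (i : Int) 0)
  | v :: w :: rest =>
    let mid := (v :: w :: rest).length / 2
    let a := pvTotal n ((v :: w :: rest).take mid)
    let b := pvTotal n ((v :: w :: rest).drop mid)
    (List.range n).map (fun (i : Nat) => a.getD i 0 + b.getD i 0)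
termination_by vs.length
decreasing_by
  · simp; omega
  · simp; omega

def bundle_alt (vecs : List (List Int)) : List Int :=
  match vecs with
  | [] => []
  | v0 :: _ =>
    (pvTotal v0.length vecs).map (fun x => if x ≥ 0 then 1 else -1)

-- ===== PRECONDITION & SPEC =====
-- Pre_ excludes only inputs where A raises IndexError: a vector shorter than the first one.
def Pre_bundle (vecs : List (List Int)) : Prop :=
  ∀ v ∈ vecs, (vecs.headD []).length ≤ v.length
instance (vecs : List (List Int)) : Decidable (Pre_bundle vecs) := by unfold Pre_bundle; infer_instance

def pvWitness_bundle : List (List Int) := [[1, -2], [3, 4], [-5, -6]]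

def Spec_bundle (vecs : List (List Int)) (out : List Int) : Prop := out = bundle_alt vecs
instance (vecs : List (List Int)) (out : List Int) : Decidable (Spec_bundle vecs out) := by unfold Spec_bundle; infer_instance

-- ===== CLAIM (what is proved, stated in full; the proofs are below) =====
def Claim_equal_bundle : Prop := ∀ (vecs : List (List Int)), Dom_bundle vecs → Pre_bundle vecs → Spec_bundle vecs (bundle vecs)

-- ===== LEMMAS AND PROOFS =====

-- the column sum both programs compute
def pvColSum (vs : List (List Int)) (i : Nat) : Int :=
  (vs.map (fun v => PySem.List.pyGetD v (i : Int) 0)).sum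

theorem pvRangeMap_getD (f : Nat → Int) (n i : Nat) (h : i < n) :
    ((List.range n).map f).getD i 0 = f i := by
  rw [List.getD_eq_getElem?_getD]
  simp [h]

-- B's helper computes the column sums
theorem pvTotal_eq (n : Nat) (vs : List (List Int)) (h : vs ≠ []) :
    pvTotal n vs = (List.range n).map (fun i => pvColSum vs i) := by
  fun_induction pvTotal n vs with
  | case1 => exact absurd rfl h
  | case2 v =>
    apply List.map_congr_left; intro i _; simp [pvColSum]
  | case3 v w rest mid a b ih1 ih2 =>
    have hlen : (v :: w :: rest).length = rest.length + 2 := by simp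
    have htk : (v :: w :: rest).take ((v :: w :: rest).length / 2) ≠ [] := by
      simp [hlen]
    have hdr : (v :: w :: rest).drop ((v :: w :: rest).length / 2) ≠ [] := by
      simp [hlen]; omega
    simp only [a, b, mid]
    rw [ih1 htk, ih2 hdr]
    apply List.map_congr_left
    intro i hi
    have hi' : i < n := List.mem_range.mp hi
    rw [pvRangeMap_getD _ _ _ hi', pvRangeMap_getD _ _ _ hi']
    show pvColSum _ i + pvColSum _ i = pvColSum _ i
    unfold pvColSum
    rw [← List.sum_append, ← List.map_append, List.take_append_drop]

-- inner loop of A: one pass over range n, generalized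
def pvStep (g : Nat → Int) (s : List Int) (k : Nat) : List Int :=
  (List.range k).foldl (fun s i => s.set i (s.getD i 0 + g i)) s

theorem pvStep_length (g : Nat → Int) (s : List Int) (k : Nat) :
    (pvStep g s k).length = s.length := by
  induction k with
  | zero => rfl
  | succ k ih => simp [pvStep, List.range_succ, List.foldl_append] at *; simp [ih]

theorem pvStep_getD (g : Nat → Int) (s : List Int) (k : Nat) (j : Nat) :
    (pvStep g s k).getD j 0 = if j < k ∧ j < s.length then s.getD j 0 + g j else s.getD j 0 := by
  induction k with
  | zero => simp [pvStep]
  | succ k ih =>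
    have hstep : pvStep g s (k+1) = (pvStep g s k).set k ((pvStep g s k).getD k 0 + g k) := by
      simp [pvStep, List.range_succ]
    rw [hstep]
    by_cases hj : j = k
    · subst hj
      by_cases hl : j < s.length
      · rw [List.getD_eq_getElem?_getD,
          List.getElem?_set_self (by rw [pvStep_length]; exact hl)]
        rw [ih]
        simp [hl]
      · rw [List.getD_eq_getElem?_getD, List.getElem?_set]
        simp [pvStep_length, hl]
    · rw [List.getD_eq_getElem?_getD, List.getElem?_set_ne (by omega),
        ← List.getD_eq_getElem?_getD, ih]
      split_ifs with h1 h2 h2 <;> first | rfl | omega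

theorem pvStep_as_map (g : Nat → Int) (f : Nat → Int) (n : Nat) :
    pvStep g ((List.range n).map f) n = (List.range n).map (fun i => f i + g i) := by
  apply List.ext_getElem
  · simp [pvStep_length]
  · intro j h1 h2
    have hj : j < n := by simpa [pvStep_length] using h1
    have hp := pvStep_getD g ((List.range n).map f) n j
    simp only [List.length_map, List.length_range, hj, and_self, if_pos] at hp
    have e1 : (pvStep g ((List.range n).map f) n)[j] =
        (pvStep g ((List.range n).map f) n).getD j 0 := by
      rw [List.getD_eq_getElem?_getD, List.getElem?_eq_getElem h1]; rfl
    rw [e1, hp]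
    simp [List.getD_eq_getElem?_getD, hj]

theorem pvFold_as_map (vs : List (List Int)) (f : Nat → Int) (n : Nat) :
    vs.foldl (fun s v => pvStep (fun (i : Nat) => PySem.List.pyGetD v (i : Int) 0) s n)
        ((List.range n).map f)
      = (List.range n).map (fun (i : Nat) =>
          vs.foldl (fun a v => a + PySem.List.pyGetD v (i : Int) 0) (f i)) := by
  induction vs generalizing f with
  | nil => simp
  | cons v vs ih =>
    simp only [List.foldl_cons, pvStep_as_map]
    exact ih _

theorem pvFoldl_eq_colSum (vs : List (List Int)) (i : Nat) (c : Int) :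
    vs.foldl (fun a v => a + PySem.List.pyGetD v (i : Int) 0) c = c + pvColSum vs i := by
  induction vs generalizing c with
  | nil => simp [pvColSum]
  | cons v vs ih =>
    simp only [List.foldl_cons]
    rw [ih]
    simp [pvColSum]
    ring

-- ===== VERDICT (by name: the statement is the Claim_ definition above) =====
theorem bundle_spec : Claim_equal_bundle := by
  intro vecs _ _
  unfold Spec_bundle bundle bundle_alt
  match vecs with
  | [] => rfl
  | v0 :: vs =>
    simp only
    have hrep : (List.replicate v0.length (0 : Int)) = (List.range v0.length).map (fun _ => (0 : Int)) := by
      simp [List.map_const']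
    rw [hrep]
    have hA := pvFold_as_map (v0 :: vs) (fun _ => 0) v0.length
    simp only [pvStep] at hA
    rw [hA, pvTotal_eq _ _ (by simp)]
    simp only [List.map_map]
    apply List.map_congr_left
    intro i _
    simp only [Function.comp_apply]
    rw [pvFoldl_eq_colSum]
    simp
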